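-- pv_equiv track=rewrite | github.com/2mdtln/funccheck | src/funccheck/formatting.py | render_output
-- ===== SOURCE A (Python) =====
-- from collections import Counter
--
-- _COLOR_BLUE_BOLD = "\033[1;34m"
--
-- _COLOR_RESET = "\033[0m"
--
-- def render_output(
--     counts: Counter[tuple[str, str]], show_count: bool, new_lines: bool
-- ) -> list[str]:
--     grouped: dict[str, list[tuple[str, int]]] = {}
--     for (file_name, func_name), count in counts.items():
--         grouped.setdefault(file_name, []).append((func_name, count))
--
--     lines: list[str] = []
--     for file_name in sorted(grouped):
--         lines.append(f"{_COLOR_BLUE_BOLD}{file_name}:{_COLOR_RESET}")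
--         if show_count:
--             entries = sorted(grouped[file_name],
--                              key=lambda item: (-item[1], item[0]))
--             if new_lines:
--                 lines.extend(f"  {func_name} "
--                              f"({count})" for func_name, count in entries)
--             else:
--                 rendered = ", ".join(
--                     f"{func_name} ({count})" for func_name, count in entries
--                 )
--                 lines.append(f"  {rendered}")
--             continue
--
--         entries = sorted(grouped[file_name], key=lambda item: item[0])
--         if new_lines:
--             lines.extend(f"  {func_name}" for func_name, _ in entries)
--         else:
--             rendered = ", ".join(func_name for func_name, _ in entries)
--             lines.append(f"  {rendered}")
--
--     return lines
-- ===== SOURCE B (Python) =====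
-- _COLOR_BLUE_BOLD = "\033[1;34m"
-- _COLOR_RESET = "\033[0m"
--
--
-- def render_output(counts, show_count, new_lines):
--     items = list(counts.items())
--     files = sorted({file_name for (file_name, _), _ in items})
--     lines = []
--     for file_name in files:
--         lines.append(f"{_COLOR_BLUE_BOLD}{file_name}:{_COLOR_RESET}")
--         group = [(fn, c) for (f, fn), c in items if f == file_name]
--         if show_count:
--             cells = [f"{fn} ({c})" for fn, c in
--                      sorted(group, key=lambda it: (-it[1], it[0]))]
--         else:
--             cells = [fn for fn, _ in sorted(group, key=lambda it: it[0])]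
--         if new_lines:
--             lines.extend("  " + cell for cell in cells)
--         else:
--             lines.append("  " + ", ".join(cells))
--     return lines
-- ===== Notes on version B (the rewrite author's own statement) =====
-- stated objective: simpler
-- what changed: B drops A's dict-of-lists: it sorts the distinct file names once and, per file, selects that file's entries by a direct filter over the items, and it merges A's four formatting branches into one cells-list followed by a single extend/join step.
import Mathlib
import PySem

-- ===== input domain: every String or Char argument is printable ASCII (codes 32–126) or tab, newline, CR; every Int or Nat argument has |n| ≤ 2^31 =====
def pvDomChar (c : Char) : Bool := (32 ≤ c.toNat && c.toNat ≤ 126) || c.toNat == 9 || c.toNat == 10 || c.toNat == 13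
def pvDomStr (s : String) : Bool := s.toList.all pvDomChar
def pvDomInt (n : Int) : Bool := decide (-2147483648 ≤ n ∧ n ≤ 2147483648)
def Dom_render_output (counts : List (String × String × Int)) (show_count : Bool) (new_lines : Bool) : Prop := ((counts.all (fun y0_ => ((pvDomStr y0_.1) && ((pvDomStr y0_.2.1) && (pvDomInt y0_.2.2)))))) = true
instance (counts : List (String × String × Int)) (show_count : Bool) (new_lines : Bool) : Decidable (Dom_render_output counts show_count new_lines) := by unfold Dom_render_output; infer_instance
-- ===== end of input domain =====

-- B replaces A's dict-of-lists grouping by a sort of the distinct file names plus a per-file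
-- filter over the items, and merges A's four formatting branches into one cells list (simpler
-- decomposition, same result; no speed claim).

-- ===== PORT A =====
def render_output (counts : List (String × String × Int)) (show_count : Bool) (new_lines : Bool) : List String :=
  let grouped : PySem.Dict String (List (String × Int)) :=
    counts.foldl (fun d p => d.modify p.1 [] (fun l => l ++ [p.2])) PySem.Dict.empty
  (PySem.List.sorted grouped.keys (fun x => x) false).foldl
    (fun lines file_name =>
      let lines := lines ++ ["\x1B[1;34m" ++ file_name ++ ":" ++ "\x1B[0m"]
      if show_count then
        let entries := PySem.List.sorted2 (grouped.getD file_name []) (fun it => -it.2) (fun it => it.1)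
        if new_lines then
          lines ++ entries.map (fun e => "  " ++ e.1 ++ " (" ++ PySem.Int.toStr e.2 ++ ")")
        else
          lines ++ ["  " ++ PySem.Str.join ", " (entries.map (fun e => e.1 ++ " (" ++ PySem.Int.toStr e.2 ++ ")"))]
      else
        let entries := PySem.List.sorted (grouped.getD file_name []) (fun it => it.1) false
        if new_lines then
          lines ++ entries.map (fun e => "  " ++ e.1)
        else
          lines ++ ["  " ++ PySem.Str.join ", " (entries.map (fun e => e.1))])
    []

-- ===== PORT B =====
def render_output_alt (counts : List (String × String × Int)) (show_count : Bool) (new_lines : Bool) : List String :=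
  let files := PySem.List.sorted (PySem.Set.ofList (counts.map (fun p => p.1))) (fun x => x) false
  files.foldl
    (fun lines file_name =>
      let lines := lines ++ ["\x1B[1;34m" ++ file_name ++ ":" ++ "\x1B[0m"]
      let group := (counts.filter (fun p => p.1 == file_name)).map (fun p => p.2)
      let cells :=
        if show_count then
          (PySem.List.sorted2 group (fun it => -it.2) (fun it => it.1)).map
            (fun e => e.1 ++ " (" ++ PySem.Int.toStr e.2 ++ ")")
        else
          (PySem.List.sorted group (fun it => it.1) false).map (fun e => e.1)
      if new_lines then
        lines ++ cells.map (fun cell => "  " ++ cell)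
      else
        lines ++ ["  " ++ PySem.Str.join ", " cells])
    []

-- ===== PRECONDITION & SPEC =====
def Spec_render_output (counts : List (String × String × Int)) (show_count : Bool) (new_lines : Bool) (out : List String) : Prop := out = render_output_alt counts show_count new_lines
instance (counts : List (String × String × Int)) (show_count : Bool) (new_lines : Bool) (out : List String) : Decidable (Spec_render_output counts show_count new_lines out) := by unfold Spec_render_output; infer_instance

-- ===== CLAIM (what is proved, stated in full; the proofs are below) =====
def Claim_equal_render_output : Prop := ∀ (counts : List (String × String × Int)) (show_count : Bool) (new_lines : Bool), Dom_render_output counts show_count new_lines → Spec_render_output counts show_count new_lines (render_output counts show_count new_lines)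

-- ===== LEMMAS AND PROOFS =====

-- A's dict keys are the distinct file names in first-occurrence order = set(files) of B.
theorem grouped_keys_eq (counts : List (String × String × Int)) :
    (counts.foldl (fun d p => d.modify p.1 [] (fun l => l ++ [p.2]))
      (PySem.Dict.empty : PySem.Dict String (List (String × Int)))).keys
      = PySem.Set.ofList (counts.map (fun p => p.1)) := by
  rw [PySem.Dict.keys_foldl_modify_key counts (fun p => p.1) []
        (fun _ p => fun l => l ++ [p.2]) PySem.Dict.empty,
      PySem.Dict.keys_empty, PySem.Set.update_nil_left]

-- A's group for a file equals B's filter-then-project of the items.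
theorem grouped_getD_eq (counts : List (String × String × Int)) (f : String) :
    (counts.foldl (fun d p => d.modify p.1 [] (fun l => l ++ [p.2]))
      (PySem.Dict.empty : PySem.Dict String (List (String × Int)))).getD f []
      = (counts.filter (fun p => p.1 == f)).map (fun p => p.2) := by
  rw [PySem.Dict.getD_foldl_modify_append counts PySem.Dict.empty f,
      PySem.Dict.getD_empty, List.nil_append]

-- ===== VERDICT (by name: the statement is the Claim_ definition above) =====
theorem render_output_spec : Claim_equal_render_output := by
  intro counts show_count new_lines _
  unfold Spec_render_output render_output render_output_alt
  dsimp only []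
  rw [grouped_keys_eq]
  apply PySem.List.foldl_congr_mem
  intro acc file _
  rw [grouped_getD_eq]
  cases show_count <;> cases new_lines <;>
    simp [List.map_map, Function.comp_def, String.append_assoc]
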